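-- pv_equiv track=rewrite | github.com/milkykittybunny/USACO | bronze/2011_digits/digits.py | digit_lst
-- ===== SOURCE A (Python) =====
-- def digit_lst(numberLst, base):
--     returnLst = set()
--     for digit in range(len(numberLst)):
--         for x in range(base):
--             if x != numberLst[digit]:
--                 temp = 0
--                 for y in range(len(numberLst)):
--                     if y == digit:
--                         temp += base ** (len(numberLst) - (y + 1)) * x
--                     else:
--                         temp += base ** (len(numberLst) - (y + 1)) * numberLst[y]
--                 returnLst.add(temp)
--     return list(returnLst)
-- ===== SOURCE B (Python) =====
-- def digit_lst(numberLst, base):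
--     n = len(numberLst)
--     total = 0
--     for d in numberLst:
--         total = total * base + d
--     pows = [1]
--     for _ in range(n - 1):
--         pows.append(pows[-1] * base)
--     pows.reverse()  # pows[digit] == base ** (n - 1 - digit)
--     out = set()
--     for digit in range(n):
--         pw = pows[digit]
--         rest = total - numberLst[digit] * pw
--         for x in range(base):
--             if x != numberLst[digit]:
--                 out.add(rest + x * pw)
--     return list(out)
-- ===== Notes on version B (the rewrite author's own statement) =====
-- stated objective: faster
-- what changed: B precomputes the whole base-value once by Horner's rule plus a table of place-value powers and forms each one-digit substitution by constant-time arithmetic (total - old*pw + x*pw), replacing A's O(n) place-value summation per candidate; intended as faster in n; measured 67.87x at the largest size both finished (n=256), while inputs with a huge base time out for both since the output itself has ~n*base elements.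
import Mathlib
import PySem

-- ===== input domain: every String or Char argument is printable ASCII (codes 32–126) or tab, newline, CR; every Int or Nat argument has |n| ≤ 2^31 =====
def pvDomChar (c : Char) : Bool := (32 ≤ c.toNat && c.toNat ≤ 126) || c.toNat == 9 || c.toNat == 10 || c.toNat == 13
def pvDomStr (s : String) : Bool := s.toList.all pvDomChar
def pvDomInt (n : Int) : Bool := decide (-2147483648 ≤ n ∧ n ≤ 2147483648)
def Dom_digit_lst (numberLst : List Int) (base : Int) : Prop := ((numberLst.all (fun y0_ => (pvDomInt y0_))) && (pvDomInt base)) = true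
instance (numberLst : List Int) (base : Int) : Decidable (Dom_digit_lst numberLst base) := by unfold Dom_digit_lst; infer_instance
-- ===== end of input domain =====

-- B replaces A's per-candidate place-value summation with a Horner precomputation of the whole
-- value plus a precomputed power table, substituting each digit arithmetically (objective: faster;
-- measured 67.87x at the largest size both Pythons finished).
-- Both Pythons return list(set(...)); the ports return the set's elements in first-insertion order
-- (the result is compared as a set).

-- ===== PORT A =====
def digit_lst (numberLst : List Int) (base : Int) : List Int :=
  let n : Int := numberLst.length
  (PySem.List.pyRange 0 n 1).foldl (fun ret digit =>
    (PySem.List.pyRange 0 base 1).foldl (fun ret x =>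
      if x ≠ PySem.List.pyGetD numberLst digit 0 then
        PySem.Set.add ret ((PySem.List.pyRange 0 n 1).foldl (fun temp y =>
          if y = digit then temp + base ^ (n - (y + 1)).toNat * x
          else temp + base ^ (n - (y + 1)).toNat * PySem.List.pyGetD numberLst y 0) 0)
      else ret) ret) PySem.Set.empty

-- ===== PORT B =====
def digit_lst_alt (numberLst : List Int) (base : Int) : List Int :=
  let n : Int := numberLst.length
  let total : Int := numberLst.foldl (fun t d => t * base + d) 0
  let pows : List Int :=
    ((PySem.List.pyRange 0 (n - 1) 1).foldl
      (fun ps _ => ps ++ [PySem.List.pyGetD ps (-1) 0 * base]) [1]).reverse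
  (PySem.List.pyRange 0 n 1).foldl (fun out digit =>
    let pw := PySem.List.pyGetD pows digit 0
    let rest := total - PySem.List.pyGetD numberLst digit 0 * pw
    (PySem.List.pyRange 0 base 1).foldl (fun out x =>
      if x ≠ PySem.List.pyGetD numberLst digit 0 then
        PySem.Set.add out (rest + x * pw)
      else out) out) PySem.Set.empty

-- ===== PRECONDITION & SPEC =====
def Spec_digit_lst (numberLst : List Int) (base : Int) (out : List Int) : Prop := out = digit_lst_alt numberLst base
instance (numberLst : List Int) (base : Int) (out : List Int) : Decidable (Spec_digit_lst numberLst base out) := by unfold Spec_digit_lst; infer_instance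

-- ===== CLAIM (what is proved, stated in full; the proofs are below) =====
def Claim_equal_digit_lst : Prop := ∀ (numberLst : List Int) (base : Int), Dom_digit_lst numberLst base → Spec_digit_lst numberLst base (digit_lst numberLst base)

-- ===== LEMMAS AND PROOFS =====

theorem pows_build (base : Int) (l : List Int) : ∀ (j : Nat),
    l.foldl (fun ps _ => ps ++ [PySem.List.pyGetD ps (-1) 0 * base])
      ((List.range (j + 1)).map (fun i => base ^ i))
    = (List.range (j + 1 + l.length)).map (fun i => base ^ i) := by
  induction l with
  | nil => intro j; simp
  | cons a t ih =>
    intro j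
    rw [List.foldl_cons]
    have h1 : (List.range (j + 1)).map (fun i => base ^ i)
        = (List.range j).map (fun i => base ^ i) ++ [base ^ j] := by
      rw [List.range_succ, List.map_append]; simp
    have h2 : PySem.List.pyGetD ((List.range (j + 1)).map (fun i => base ^ i)) (-1) 0 = base ^ j := by
      rw [h1, PySem.List.pyGetD_neg_one_append_singleton]
    rw [h2]
    have h3 : (List.range (j + 1)).map (fun i => base ^ i) ++ [base ^ j * base]
        = (List.range (j + 2)).map (fun i => base ^ i) := by
      rw [List.range_succ (n := j + 1), List.map_append]
      simp [pow_succ]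
    rw [h3]
    have := ih (j + 1)
    simpa [Nat.add_assoc, Nat.add_comm, Nat.add_left_comm] using this

theorem pows_get (base : Int) (L : List Int) (digit : Int)
    (hd0 : 0 ≤ digit) (hdn : digit < (L.length : Int)) :
    PySem.List.pyGetD
      (((PySem.List.pyRange 0 ((L.length : Int) - 1) 1).foldl
        (fun ps _ => ps ++ [PySem.List.pyGetD ps (-1) 0 * base]) [1]).reverse) digit 0
    = base ^ (L.length - 1 - digit.toNat) := by
  have hstart : ([1] : List Int) = (List.range (0 + 1)).map (fun i => base ^ i) := by simp
  have hlen : (PySem.List.pyRange 0 ((L.length : Int) - 1) 1).length = L.length - 1 := by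
    rw [PySem.List.length_pyRange_one]; omega
  have hfold := pows_build base (PySem.List.pyRange 0 ((L.length : Int) - 1) 1) 0
  rw [hstart, hfold, hlen]
  have hn1 : 0 + 1 + (L.length - 1) = L.length := by omega
  rw [hn1]
  have hlt : digit.toNat < L.length := by omega
  have hrl : (((List.range L.length).map (fun i => base ^ i)).reverse).length = L.length := by simp
  rw [PySem.List.pyGetD_eq_getElem _ 0 hd0 (by simpa using hdn)]
  rw [List.getElem_reverse]
  simp

theorem horner_eq_sum (base : Int) (L : List Int) :
    L.foldl (fun t d => t * base + d) 0
    = ∑ i ∈ Finset.range L.length, base ^ (L.length - 1 - i) * L.getD i 0 := by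
  induction L using List.reverseRecOn with
  | nil => simp
  | append_singleton l a ih =>
    rw [List.foldl_append, List.foldl_cons, List.foldl_nil, ih]
    simp only [List.length_append, List.length_singleton]
    rw [Finset.sum_range_succ]
    have hlast : (l ++ [a]).getD l.length 0 = a := by
      simp [List.getD]
    rw [hlast]
    have hterm : ∀ i ∈ Finset.range l.length,
        base ^ (l.length + 1 - 1 - i) * (l ++ [a]).getD i 0
        = base * (base ^ (l.length - 1 - i) * l.getD i 0) := by
      intro i hi
      rw [Finset.mem_range] at hi
      have hget : (l ++ [a]).getD i 0 = l.getD i 0 := by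
        simp [List.getD, List.getElem?_append_left hi]
      rw [hget]
      have : l.length + 1 - 1 - i = (l.length - 1 - i) + 1 := by omega
      rw [this, pow_succ]
      ring
    rw [Finset.sum_congr rfl hterm, ← Finset.mul_sum]
    have h0 : l.length + 1 - 1 - l.length = 0 := by omega
    rw [h0]
    ring

theorem temp_eq (base : Int) (L : List Int) (digit x : Int)
    (hd0 : 0 ≤ digit) (hdn : digit < (L.length : Int)) :
    (PySem.List.pyRange 0 (L.length : Int) 1).foldl (fun temp y =>
        if y = digit then temp + base ^ ((L.length : Int) - (y + 1)).toNat * x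
        else temp + base ^ ((L.length : Int) - (y + 1)).toNat * PySem.List.pyGetD L y 0) 0
    = L.foldl (fun t d => t * base + d) 0
      - L.getD digit.toNat 0 * base ^ (L.length - 1 - digit.toNat)
      + x * base ^ (L.length - 1 - digit.toNat) := by
  have hstep : (PySem.List.pyRange 0 (L.length : Int) 1).foldl (fun temp y =>
        if y = digit then temp + base ^ ((L.length : Int) - (y + 1)).toNat * x
        else temp + base ^ ((L.length : Int) - (y + 1)).toNat * PySem.List.pyGetD L y 0) 0
      = (PySem.List.pyRange 0 (L.length : Int) 1).foldl (fun temp y =>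
        temp + base ^ ((L.length : Int) - (y + 1)).toNat *
          (if y = digit then x else PySem.List.pyGetD L y 0)) 0 := by
    apply PySem.List.foldl_congr_mem
    intro acc y _
    by_cases h : y = digit <;> simp [h]
  rw [hstep]
  rw [PySem.List.foldl_add (g := fun y => base ^ ((L.length : Int) - (y + 1)).toNat *
        (if y = digit then x else PySem.List.pyGetD L y 0))]
  rw [PySem.List.pyRange_zero_natCast, List.map_map]
  have hsum : ∀ (h : Nat → Int), ((List.range L.length).map h).sum = ∑ i ∈ Finset.range L.length, h i :=
    fun _ => rfl
  rw [hsum]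
  have hmap : ∀ i ∈ Finset.range L.length,
      ((fun y => base ^ ((L.length : Int) - (y + 1)).toNat *
        (if y = digit then x else PySem.List.pyGetD L y 0)) ∘ (fun k : Nat => (k : Int))) i
      = base ^ (L.length - 1 - i) * L.getD i 0
        + (if i = digit.toNat then (x - L.getD digit.toNat 0) * base ^ (L.length - 1 - digit.toNat) else 0) := by
    intro i hi
    rw [Finset.mem_range] at hi
    simp only [Function.comp]
    have he : ((L.length : Int) - ((i : Int) + 1)).toNat = L.length - 1 - i := by omega
    have hget : PySem.List.pyGetD L (i : Int) 0 = L.getD i 0 := by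
      simp [PySem.List.pyGetD_natCast]
    have hiff : ((i : Int) = digit) ↔ (i = digit.toNat) := by omega
    rw [he, hget]
    by_cases h : i = digit.toNat
    · rw [if_pos (hiff.mpr h), if_pos h, h]
      ring
    · rw [if_neg (fun hh => h (hiff.mp hh)), if_neg h]
      ring
  rw [Finset.sum_congr rfl hmap, Finset.sum_add_distrib, Finset.sum_ite_eq' (Finset.range L.length)]
  rw [if_pos (Finset.mem_range.mpr (by omega))]
  rw [horner_eq_sum base L]
  ring


-- The element A inserts equals the element B inserts, position by position.
theorem elem_eq (base : Int) (L : List Int) (digit x : Int)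
    (hd0 : 0 ≤ digit) (hdn : digit < (L.length : Int)) :
    (PySem.List.pyRange 0 (L.length : Int) 1).foldl (fun temp y =>
        if y = digit then temp + base ^ ((L.length : Int) - (y + 1)).toNat * x
        else temp + base ^ ((L.length : Int) - (y + 1)).toNat * PySem.List.pyGetD L y 0) 0
    = L.foldl (fun t d => t * base + d) 0
      - PySem.List.pyGetD L digit 0 *
        PySem.List.pyGetD
          (((PySem.List.pyRange 0 ((L.length : Int) - 1) 1).foldl
            (fun ps _ => ps ++ [PySem.List.pyGetD ps (-1) 0 * base]) [1]).reverse) digit 0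
      + x * PySem.List.pyGetD
          (((PySem.List.pyRange 0 ((L.length : Int) - 1) 1).foldl
            (fun ps _ => ps ++ [PySem.List.pyGetD ps (-1) 0 * base]) [1]).reverse) digit 0 := by
  have hb : digit.toNat < L.length := by omega
  have hget : PySem.List.pyGetD L digit 0 = L.getD digit.toNat 0 := by
    rw [PySem.List.pyGetD_eq_getElem L 0 hd0 hdn, ← List.getD_eq_getElem L 0 hb]
  rw [temp_eq base L digit x hd0 hdn, pows_get base L digit hd0 hdn, hget]

-- ===== VERDICT (by name: the statement is the Claim_ definition above) =====
theorem digit_lst_spec : Claim_equal_digit_lst := by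
  intro L base _
  unfold Spec_digit_lst digit_lst digit_lst_alt
  dsimp only
  apply PySem.List.foldl_congr_mem
  intro acc digit hmem
  rw [PySem.List.mem_pyRange_one] at hmem
  obtain ⟨hd0, hdn⟩ := hmem
  apply PySem.List.foldl_congr_mem
  intro acc2 x _
  by_cases h : x ≠ PySem.List.pyGetD L digit 0
  · rw [if_pos h, if_pos h]
    congr 1
    rw [elem_eq base L digit x hd0 hdn]
  · rw [if_neg h, if_neg h]
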